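-- pv_equiv track=rewrite | github.com/mauboro/my_katas | min_max_min_bounded_nums/python/main.py | min_min_max
-- ===== SOURCE A (Python) =====
-- def min_min_max(arr):
--     mn = min(arr)
--     mx = max(arr)
--     mna = 0
--     for i in range(mn, mx):
--         if i not in arr:
--             mna = i
--             break
--     return [mn, mna, mx]
-- ===== SOURCE B (Python) =====
-- def min_min_max(arr):
--     mn = min(arr)
--     mx = max(arr)
--     s = sorted(arr)
--     mna = 0
--     for a, b in zip(s, s[1:]):
--         if b > a + 1:
--             mna = a + 1
--             break
--     return [mn, mna, mx]
-- ===== Notes on version B (the rewrite author's own statement) =====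
-- stated objective: alternative
-- what changed: Instead of scanning integers upward from min and testing each with 'in arr', B sorts a copy of the list once and returns first-adjacent-gap + 1 as the smallest missing value; it trades A's value-range scan with repeated membership tests for a single sort and one pass over adjacent pairs.
import Mathlib
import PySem

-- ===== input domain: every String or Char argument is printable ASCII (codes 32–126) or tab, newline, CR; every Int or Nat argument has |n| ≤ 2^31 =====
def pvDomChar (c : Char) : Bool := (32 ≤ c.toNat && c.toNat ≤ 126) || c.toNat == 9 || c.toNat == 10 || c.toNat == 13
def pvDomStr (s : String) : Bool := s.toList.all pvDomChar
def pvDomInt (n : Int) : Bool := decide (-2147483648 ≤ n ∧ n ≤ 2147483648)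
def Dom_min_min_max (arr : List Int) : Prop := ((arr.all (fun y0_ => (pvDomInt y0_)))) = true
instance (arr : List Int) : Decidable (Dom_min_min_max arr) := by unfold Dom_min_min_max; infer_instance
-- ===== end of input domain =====

-- B replaces A's upward membership scan from min by one sort of a copy and a
-- first-adjacent-gap scan (objective: alternative algorithm, similar cost).

-- ===== PORT A =====
-- the for-loop 'for i in range(mn, mx)' with break: first i not contained in arr, else mna stays 0
def pvFindA (arr : List Int) (mx : Int) (i : Int) : Int :=
  if h : i < mx then (if i ∈ arr then pvFindA arr mx (i + 1) else i) else 0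
termination_by (mx - i).toNat
decreasing_by omega

def min_min_max (arr : List Int) : List Int :=
  match PySem.List.min? arr (fun x => x), PySem.List.max? arr (fun x => x) with
  | some mn, some mx => [mn, pvFindA arr mx mn, mx]
  | _, _ => []

-- ===== PORT B =====
-- the for-loop over zip(s, s[1:]) with break: first adjacent pair with a gap
def pvGap : List (Int × Int) → Int
  | [] => 0
  | (a, b) :: rest => if b > a + 1 then a + 1 else pvGap rest

def min_min_max_alt (arr : List Int) : List Int :=
  match PySem.List.min? arr (fun x => x) with
  | none => []
  | some mn =>
    match PySem.List.max? arr (fun x => x) with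
    | none => []
    | some mx =>
      let s := PySem.List.sorted arr (fun x => x) false
      [mn, pvGap (s.zip (PySem.List.slice s (some 1) none)), mx]

-- ===== PRECONDITION & SPEC =====
-- Python's min/max raise ValueError on an empty list (both A and B raise there)
def Pre_min_min_max (arr : List Int) : Prop := arr ≠ []
instance (arr : List Int) : Decidable (Pre_min_min_max arr) := by unfold Pre_min_min_max; infer_instance
def pvWitness_min_min_max : List Int := [3, 1, 5, 1]

def Spec_min_min_max (arr : List Int) (out : List Int) : Prop := out = min_min_max_alt arr
instance (arr : List Int) (out : List Int) : Decidable (Spec_min_min_max arr out) := by unfold Spec_min_min_max; infer_instance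

-- ===== CLAIM (what is proved, stated in full; the proofs are below) =====
def Claim_equal_min_min_max : Prop := ∀ (arr : List Int), Dom_min_min_max arr → Pre_min_min_max arr → Spec_min_min_max arr (min_min_max arr)

-- ===== LEMMAS AND PROOFS =====

-- proof-side view of A's loop as a scan over the explicit list range(mn, mx)
def pvFindL (arr : List Int) : List Int → Int
  | [] => 0
  | i :: rest => if i ∈ arr then pvFindL arr rest else i

theorem pvFindA_eq (arr : List Int) (mx : Int) (i : Int) :
    pvFindA arr mx i = pvFindL arr (PySem.List.pyRange i mx 1) := by
  generalize hn : (mx - i).toNat = n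
  induction n generalizing i with
  | zero =>
    rw [pvFindA, dif_neg (by omega), PySem.List.pyRange_one_eq_nil (by omega : mx ≤ i)]
    rfl
  | succ n ih =>
    rw [pvFindA]
    by_cases h : i < mx
    · rw [dif_pos h, PySem.List.pyRange_one_cons h]
      by_cases hm : i ∈ arr
      · rw [if_pos hm, ih (i + 1) (by omega)]
        simp [pvFindL, hm]
      · simp [pvFindL, hm]
    · rw [dif_neg h, PySem.List.pyRange_one_eq_nil (by omega : mx ≤ i)]
      rfl

-- Main invariant: walking a sorted suffix a :: rest of sorted(arr), the gap scan equals
-- A's linear scan restarted at a+1 (every integer in [mn, a] has been seen to be present).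
theorem pvGap_eq_findA (arr : List Int) (mx : Int) (hmx : mx ∈ arr) :
    ∀ (rest : List Int) (a : Int), (a :: rest).Pairwise (· ≤ ·) →
      (∀ x ∈ (a :: rest), x ∈ arr) →
      (∀ x ∈ arr, x ∈ (a :: rest) ∨ x ≤ a) →
      (∀ x ∈ (a :: rest), x ≤ mx) →
      pvGap ((a :: rest).zip rest) = pvFindL arr (PySem.List.pyRange (a + 1) mx 1) := by
  intro rest
  induction rest with
  | nil =>
    intro a _ _ hcover _
    have hle : mx ≤ a := by
      rcases hcover mx hmx with h | h
      · simp at h; omega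
      · exact h
    rw [PySem.List.pyRange_one_eq_nil (show mx ≤ a + 1 by omega)]
    simp [pvGap, pvFindL]
  | cons b rest' ih =>
    intro a hpair hin hcover hbound
    have hab : a ≤ b := (List.pairwise_cons.1 hpair).1 b (by simp)
    have hpair' : (b :: rest').Pairwise (· ≤ ·) := (List.pairwise_cons.1 hpair).2
    have hin' : ∀ x ∈ (b :: rest'), x ∈ arr := fun x hx => hin x (by simp [hx])
    have hcover' : ∀ x ∈ arr, x ∈ (b :: rest') ∨ x ≤ b := by
      intro x hx
      rcases hcover x hx with h | h
      · rcases List.mem_cons.1 h with rfl | h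
        · exact Or.inr hab
        · exact Or.inl h
      · exact Or.inr (le_trans h hab)
    have hbound' : ∀ x ∈ (b :: rest'), x ≤ mx := fun x hx => hbound x (by simp [hx])
    show pvGap ((a, b) :: (b :: rest').zip rest') = _
    by_cases hgap : b > a + 1
    · -- a gap: a+1 is missing from arr, and a+1 < mx
      have hbmx : b ≤ mx := hbound b (by simp)
      rw [PySem.List.pyRange_one_cons (show a + 1 < mx by omega)]
      have hnotin : (a + 1) ∉ arr := by
        intro hmem
        rcases hcover (a + 1) hmem with h | h
        · rcases List.mem_cons.1 h with h1 | h
          · omega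
          · have hble : b ≤ a + 1 := by
              rcases List.mem_cons.1 h with h2 | h2
              · omega
              · exact (List.pairwise_cons.1 hpair').1 _ h2
            omega
        · omega
      simp [pvGap, hgap, pvFindL, hnotin]
    · -- no gap: b = a or b = a+1; the two ranges scan to the same result
      have hb : b = a ∨ b = a + 1 := by omega
      have hstep : pvFindL arr (PySem.List.pyRange (a + 1) mx 1)
          = pvFindL arr (PySem.List.pyRange (b + 1) mx 1) := by
        rcases hb with rfl | rfl
        · rfl
        · by_cases hlt : a + 1 < mx
          · rw [PySem.List.pyRange_one_cons hlt]
            have : (a + 1) ∈ arr := hin' _ (by simp)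
            simp [pvFindL, this]
          · rw [PySem.List.pyRange_one_eq_nil (show mx ≤ a + 1 by omega),
                PySem.List.pyRange_one_eq_nil (show mx ≤ a + 1 + 1 by omega)]
      rw [hstep, ← ih b hpair' hin' hcover' hbound']
      simp [pvGap, hgap]

-- helper: membership test in pvFindA is b to arr's: none needed; top-level proof
theorem min_min_max_eq (arr : List Int) (h : arr ≠ []) :
    min_min_max arr = min_min_max_alt arr := by
  obtain ⟨mn, hmn⟩ : ∃ mn, PySem.List.min? arr (fun x => x) = some mn := by
    cases hm : PySem.List.min? arr (fun x => x) with
    | none => exact absurd ((PySem.List.min?_eq_none_iff arr (fun x => x)).1 hm) h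
    | some m => exact ⟨m, rfl⟩
  obtain ⟨mx, hmx⟩ : ∃ mx, PySem.List.max? arr (fun x => x) = some mx := by
    cases hm : PySem.List.max? arr (fun x => x) with
    | none => exact absurd ((PySem.List.max?_eq_none_iff arr (fun x => x)).1 hm) h
    | some m => exact ⟨m, rfl⟩
  have hmnmem : mn ∈ arr := PySem.List.min?_mem hmn
  have hmxmem : mx ∈ arr := PySem.List.max?_mem hmx
  have hmnmin : ∀ y ∈ arr, mn ≤ y := fun y hy => PySem.List.min?_isMin hmn y hy
  have hmxmax : ∀ y ∈ arr, y ≤ mx := fun y hy => PySem.List.max?_isMax hmx y hy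
  -- the sorted copy
  set s := PySem.List.sorted arr (fun x => x) false with hs
  obtain ⟨a0, t, hst⟩ : ∃ a0 t, s = a0 :: t := by
    cases hse : s with
    | nil => exact absurd ((PySem.List.sorted_eq_nil_iff arr (fun x => x) false).1 hse) h
    | cons a t => exact ⟨a, t, rfl⟩
  have hmem : ∀ x, x ∈ s ↔ x ∈ arr := fun x => PySem.List.mem_sorted arr (fun x => x) false x
  have hpair : s.Pairwise (· ≤ ·) := PySem.List.sorted_pairwise arr (fun x => x)
  -- head of sorted = mn
  have ha0 : a0 = mn := by
    have h1 : mn ≤ a0 := hmnmin a0 ((hmem a0).1 (by simp [hst]))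
    have h2 : a0 ≤ mn := PySem.List.key_head_sorted_le arr (fun x => x) hst mn hmnmem
    omega
  have hgap : pvGap (s.zip (PySem.List.slice s (some 1) none))
      = pvFindL arr (PySem.List.pyRange (a0 + 1) mx 1) := by
    rw [PySem.List.slice_from_one, hst]
    exact pvGap_eq_findA arr mx hmxmem t a0 (hst ▸ hpair)
      (fun x hx => (hmem x).1 (hst ▸ hx))
      (fun x hx => Or.inl (hst ▸ (hmem x).2 hx))
      (fun x hx => hmxmax x ((hmem x).1 (hst ▸ hx)))
  have hA : pvFindA arr mx mn
      = pvFindL arr (PySem.List.pyRange (mn + 1) mx 1) := by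
    rw [pvFindA_eq]
    by_cases hlt : mn < mx
    · rw [PySem.List.pyRange_one_cons hlt]; simp [pvFindL, hmnmem]
    · rw [PySem.List.pyRange_one_eq_nil (show mx ≤ mn by omega),
          PySem.List.pyRange_one_eq_nil (show mx ≤ mn + 1 by omega)]
  unfold min_min_max min_min_max_alt
  rw [hmn, hmx]
  simp only [← hs, hgap, ha0, hA]

-- ===== VERDICT (by name: the statement is the Claim_ definition above) =====
theorem min_min_max_spec : Claim_equal_min_min_max := by
  intro arr _ hpre
  unfold Spec_min_min_max
  exact min_min_max_eq arr hpre
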